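-- pv_equiv track=rewrite | github.com/djtlb/BeatsPro | wordpress-beat-addicts-export/beat-addicts-core/modules/voice_handler.py | _syllabify_lyrics
-- ===== SOURCE A (Python) =====
-- from typing import Dict, List, Tuple, Optional, Any
--
-- def _syllabify_lyrics(lyrics: str) -> List[str]:
--     """Break lyrics into syllables"""
--     # Simple syllable splitting (can be enhanced with linguistic libraries)
--     words = lyrics.lower().split()
--     syllables = []
--
--     for word in words:
--         # Basic syllable detection by vowel groups
--         word_syllables = []
--         current_syllable = ""
--
--         vowels = "aeiouAEIOU"
--         in_vowel_group = False
--
--         for char in word: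
--             current_syllable += char
--
--             if char in vowels:
--                 if not in_vowel_group:
--                     in_vowel_group = True
--             else:
--                 if in_vowel_group:
--                     # End of vowel group - potential syllable break
--                     word_syllables.append(current_syllable[:-1])
--                     current_syllable = char
--                     in_vowel_group = False
--
--         if current_syllable:
--             if word_syllables:
--                 word_syllables[-1] += current_syllable
--             else:
--                 word_syllables.append(current_syllable)
--
--         syllables.extend(word_syllables if word_syllables else [word])
--
--     return syllables
-- ===== SOURCE B (Python) =====
-- def _syllabify_lyrics(lyrics):
--     """Break lyrics into syllables (run-based tokenizer instead of a char state machine)."""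
--     vowels = set("aeiou")
--     syllables = []
--     for word in lyrics.lower().split():
--         # a raw piece = maximal run of non-vowels followed by the vowel run after it
--         pieces = []
--         rest = word
--         while rest:
--             k = 0
--             while k < len(rest) and rest[k] not in vowels:
--                 k += 1
--             while k < len(rest) and rest[k] in vowels:
--                 k += 1
--             pieces.append(rest[:k])
--             rest = rest[k:]
--         # the trailing piece is always merged into the previous one
--         if len(pieces) > 1:
--             last = pieces.pop()
--             pieces[-1] += last
--         syllables.extend(pieces)
--     return syllables
-- ===== Notes on version B (the rewrite author's own statement) =====
-- stated objective: alternative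
-- what changed: Replaces A's char-by-char state machine (accumulator string + in_vowel_group flag) with a run-based tokenizer: each word is cut into maximal non-vowel+vowel runs by counted takeWhile scans, and the trailing piece is merged by one list operation instead of A's finalisation branches.
import Mathlib
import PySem

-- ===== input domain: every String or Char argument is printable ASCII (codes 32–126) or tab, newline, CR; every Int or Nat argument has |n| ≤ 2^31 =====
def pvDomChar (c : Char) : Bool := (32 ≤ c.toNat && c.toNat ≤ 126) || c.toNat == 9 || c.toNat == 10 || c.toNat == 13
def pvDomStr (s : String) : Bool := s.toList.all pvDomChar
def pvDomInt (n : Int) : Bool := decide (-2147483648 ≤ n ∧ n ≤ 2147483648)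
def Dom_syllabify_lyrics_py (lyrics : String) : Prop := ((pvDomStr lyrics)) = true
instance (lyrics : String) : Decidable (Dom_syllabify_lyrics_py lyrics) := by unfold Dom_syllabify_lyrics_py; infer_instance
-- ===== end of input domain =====

-- B replaces A's char-by-char state machine by a run-based tokenizer; same O(n) cost, different decomposition.

-- ===== PORT A =====
-- A's `vowels = "aeiouAEIOU"`; `char in vowels`
def pvIsVA (c : Char) : Bool := ("aeiouAEIOU".toList).contains c

-- one step of A's `for char in word` loop; state = (word_syllables, current_syllable, in_vowel_group),
-- strings carried as List Char
def pvStepA (st : List (List Char) × List Char × Bool) (c : Char) : List (List Char) × List Char × Bool :=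
  let cur := st.2.1 ++ [c]                                -- current_syllable += char
  if pvIsVA c then
    if st.2.2 = false then (st.1, cur, true) else (st.1, cur, st.2.2)
  else
    if st.2.2 then (st.1 ++ [cur.dropLast], [c], false)   -- `current_syllable[:-1]` is exactly dropLast
    else (st.1, cur, st.2.2)

-- one iteration of A's outer `for word in words` body
def pvWordA (w : List Char) : List (List Char) :=
  let st := w.foldl pvStepA ([], [], false)
  let syls :=
    if st.2.1 ≠ [] then                                   -- if current_syllable:
      (if st.1 ≠ [] then st.1.dropLast ++ [(st.1.getLastD []) ++ st.2.1]  -- word_syllables[-1] += current_syllable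
       else st.1 ++ [st.2.1])                             -- word_syllables.append(current_syllable)
    else st.1
  if syls ≠ [] then syls else [w]                         -- word_syllables if word_syllables else [word]

def syllabify_lyrics_py (lyrics : String) : List String :=
  ((PySem.Chars.split₀ (PySem.Chars.lower lyrics.toList)).foldl
      (fun acc w => acc ++ pvWordA w) []).map String.ofList

-- ===== PORT B =====
-- B's `vowels = set("aeiou")`; `rest[k] in vowels`
def pvIsV (c : Char) : Bool := (['a','e','i','o','u'] : List Char).contains c

-- `while k < len(rest) and rest[k] not in vowels: k += 1`
def pvCountNonV : List Char → Nat
  | [] => 0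
  | c :: t => if pvIsV c then 0 else pvCountNonV t + 1

-- `while k < len(rest) and rest[k] in vowels: k += 1`
def pvCountV : List Char → Nat
  | [] => 0
  | c :: t => if pvIsV c then pvCountV t + 1 else 0

theorem pvK_pos (c : Char) (t : List Char) :
    0 < pvCountNonV (c :: t) + pvCountV ((c :: t).drop (pvCountNonV (c :: t))) := by
  by_cases h : pvIsV c
  · have h0 : pvCountNonV (c :: t) = 0 := by simp [pvCountNonV, h]
    rw [h0]
    simp [pvCountV, h]
  · have h0 : pvCountNonV (c :: t) = pvCountNonV t + 1 := by simp [pvCountNonV, h]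
    omega

-- B's `while rest:` loop; each turn takes one raw piece of k ≥ 1 chars off the front
def pvPieces : List Char → List (List Char)
  | [] => []
  | c :: t =>
      let k := pvCountNonV (c :: t) + pvCountV ((c :: t).drop (pvCountNonV (c :: t)))
      (c :: t).take k :: pvPieces ((c :: t).drop k)
termination_by w => w.length
decreasing_by
  simp only [List.length_drop, List.length_cons]
  have := pvK_pos c t
  omega

-- one iteration of B's outer loop body: the raw pieces, then `pieces[-1] += pieces.pop()`
def pvWordB (w : List Char) : List (List Char) :=
  let ps := pvPieces w
  if ps.length > 1 then
    ps.dropLast.dropLast ++ [ps.dropLast.getLastD [] ++ ps.getLastD []]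
  else ps

def syllabify_lyrics_py_alt (lyrics : String) : List String :=
  ((PySem.Chars.split₀ (PySem.Chars.lower lyrics.toList)).foldl
      (fun acc w => acc ++ pvWordB w) []).map String.ofList

-- ===== PRECONDITION & SPEC =====
def Spec_syllabify_lyrics_py (lyrics : String) (out : List String) : Prop := out = syllabify_lyrics_py_alt lyrics
instance (lyrics : String) (out : List String) : Decidable (Spec_syllabify_lyrics_py lyrics out) := by unfold Spec_syllabify_lyrics_py; infer_instance

-- ===== CLAIM (what is proved, stated in full; the proofs are below) =====
def Claim_equal_syllabify_lyrics_py : Prop := ∀ (lyrics : String), Dom_syllabify_lyrics_py lyrics → Spec_syllabify_lyrics_py lyrics (syllabify_lyrics_py lyrics)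

-- ===== LEMMAS AND PROOFS =====

-- the two vowel tests agree on every character that is not an upper-case letter
theorem pv_notupper (c : Char) (h : PySem.Chars.isupper c = false) : pvIsVA c = pvIsV c := by
  have hA : c ≠ 'A' := by rintro rfl; exact absurd h (by decide)
  have hE : c ≠ 'E' := by rintro rfl; exact absurd h (by decide)
  have hI : c ≠ 'I' := by rintro rfl; exact absurd h (by decide)
  have hO : c ≠ 'O' := by rintro rfl; exact absurd h (by decide)
  have hU : c ≠ 'U' := by rintro rfl; exact absurd h (by decide)
  show ("aeiouAEIOU".toList).contains c = (['a','e','i','o','u'] : List Char).contains c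
  simp only [show "aeiouAEIOU".toList = ['a','e','i','o','u','A','E','I','O','U'] from by decide,
    List.contains_eq_mem, List.mem_cons, List.not_mem_nil, or_false, decide_eq_decide]
  tauto

theorem pv_lower_notupper (d : Char) : PySem.Chars.isupper (PySem.Chars.lowerChar d) = false := by
  by_cases h : PySem.Chars.isupper d
  · have hb : 65 ≤ d.toNat ∧ d.toNat ≤ 90 := by
      simpa [PySem.Chars.isupper, Char.le_def] using h
    have hv : (Char.ofNat (d.toNat + 32)).toNat = d.toNat + 32 := by
      rw [Char.toNat_ofNat]
      have : (d.toNat + 32).isValidChar := by constructor; omega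
      simp [this]
    rw [show PySem.Chars.lowerChar d = Char.ofNat (d.toNat + 32) from by
      simp [PySem.Chars.lowerChar, h]]
    simp only [PySem.Chars.isupper, Bool.and_eq_false_iff, decide_eq_false_iff_not]
    right
    intro hle
    have h2 : (Char.ofNat (d.toNat + 32)).toNat ≤ ('Z' : Char).toNat := Fin.mk_le_mk.mp hle
    rw [hv] at h2
    have : ('Z' : Char).toNat = 90 := by decide
    omega
  · rw [show PySem.Chars.lowerChar d = d from by simp [PySem.Chars.lowerChar, h]]
    simpa using h

theorem pv_agree_lower (c : Char) (hc : c ∈ PySem.Chars.lower s) : pvIsVA c = pvIsV c := by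
  simp only [PySem.Chars.lower, List.mem_map] at hc
  obtain ⟨d, _, rfl⟩ := hc
  exact pv_notupper _ (pv_lower_notupper d)

-- unfolding pvPieces at a vowel / non-vowel head
theorem pvPieces_vowel (c : Char) (t : List Char) (h : pvIsV c = true) :
    pvPieces (c :: t) = (c :: t.take (pvCountV t)) :: pvPieces (t.drop (pvCountV t)) := by
  rw [pvPieces]
  have h0 : pvCountNonV (c :: t) = 0 := by simp [pvCountNonV, h]
  have h1 : pvCountV (c :: t) = pvCountV t + 1 := by simp [pvCountV, h]
  simp [h0, h1]

theorem pvPieces_nonvowel (c : Char) (t : List Char) (h : pvIsV c = false) :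
    pvPieces (c :: t) = match pvPieces t with
      | [] => [[c]]
      | p :: ps => (c :: p) :: ps := by
  cases t with
  | nil =>
      rw [pvPieces]
      simp [pvCountNonV, pvCountV, h, pvPieces]
  | cons c' t' =>
      rw [pvPieces, pvPieces]
      have h0 : pvCountNonV (c :: c' :: t') = pvCountNonV (c' :: t') + 1 := by
        simp [pvCountNonV, h]
      rw [h0, Nat.add_right_comm]
      simp only [List.drop_succ_cons, List.take_succ_cons]

-- the "linearisation" of A's machine state: completed pieces plus the pending current_syllable
def pvLin (st : List (List Char) × List Char × Bool) : List (List Char) :=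
  st.1 ++ (if st.2.1 = [] then [] else [st.2.1])

-- what the rest of the word contributes, as a function of the pending state
def pvM (cur : List Char) (ivg : Bool) (w : List Char) : List (List Char) :=
  if ivg then (cur ++ w.take (pvCountV w)) :: pvPieces (w.drop (pvCountV w))
  else match pvPieces w with
    | [] => if cur = [] then [] else [cur]
    | p :: ps => (cur ++ p) :: ps

-- machine invariant: running A's loop from state (syls, cur, ivg) linearises to syls ++ pvM cur ivg w
theorem pv_machine (w : List Char) : ∀ (syls : List (List Char)) (cur : List Char) (ivg : Bool),
    (ivg = true → cur ≠ []) → (∀ c ∈ w, pvIsVA c = pvIsV c) →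
    pvLin (w.foldl pvStepA (syls, cur, ivg)) = syls ++ pvM cur ivg w := by
  induction w with
  | nil =>
      intro syls cur ivg hi _
      cases ivg with
      | true => simp [pvLin, pvM, pvPieces, pvCountV, hi rfl]
      | false =>
          by_cases hc : cur = [] <;> simp [pvLin, pvM, pvPieces, hc]
  | cons c t ih =>
      intro syls cur ivg hi hP
      have hcP : pvIsVA c = pvIsV c := hP c (by simp)
      have htP : ∀ c' ∈ t, pvIsVA c' = pvIsV c' := fun c' h => hP c' (by simp [h])
      rw [List.foldl_cons]
      by_cases hv : pvIsV c
      · -- vowel: state becomes (syls, cur ++ [c], true)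
        have hstep : pvStepA (syls, cur, ivg) c = (syls, cur ++ [c], true) := by
          cases ivg <;> simp [pvStepA, hcP, hv]
        rw [hstep, ih syls (cur ++ [c]) true (fun _ => by simp) htP]
        congr 1
        cases ivg with
        | true =>
            have h1 : pvCountV (c :: t) = pvCountV t + 1 := by simp [pvCountV, hv]
            simp [pvM, h1]
        | false =>
            simp only [pvM, if_true, if_false, Bool.false_eq_true]
            rw [pvPieces_vowel c t hv]
            simp
      · -- non-vowel
        have hvf : pvIsV c = false := by simpa using hv
        cases ivg with
        | true =>
            have hstep : pvStepA (syls, cur, true) c = (syls ++ [cur], [c], false) := by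
              simp [pvStepA, hcP, hv]
            rw [hstep, ih (syls ++ [cur]) [c] false (by simp) htP]
            have h0 : pvCountV (c :: t) = 0 := by simp [pvCountV, hv]
            simp only [pvM, if_true, h0, List.take_zero, List.drop_zero, List.append_nil,
              List.append_assoc, List.singleton_append, Bool.false_eq_true, if_false]
            congr 1
            rw [pvPieces_nonvowel c t hvf]
            cases hps : pvPieces t <;> simp
        | false =>
            have hstep : pvStepA (syls, cur, false) c = (syls, cur ++ [c], false) := by
              simp [pvStepA, hcP, hv]
            rw [hstep, ih syls (cur ++ [c]) false (by simp) htP]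
            congr 1
            simp only [pvM, Bool.false_eq_true, if_false]
            rw [pvPieces_nonvowel c t hvf]
            cases hps : pvPieces t <;> simp

-- after a non-empty word, current_syllable is non-empty
theorem pv_cur_ne (w : List Char) : ∀ (syls : List (List Char)) (cur : List Char) (ivg : Bool),
    (cur ≠ [] ∨ w ≠ []) → (w.foldl pvStepA (syls, cur, ivg)).2.1 ≠ [] := by
  induction w with
  | nil => intro syls cur ivg h; simpa using h.resolve_right (by simp)
  | cons c t ih =>
      intro syls cur ivg _
      rw [List.foldl_cons]
      rcases hst : pvStepA (syls, cur, ivg) c with ⟨s', c', i'⟩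
      have hc' : c' ≠ [] := by
        simp only [pvStepA] at hst
        split at hst <;> split at hst <;>
          (rw [Prod.mk.injEq, Prod.mk.injEq] at hst;
           obtain ⟨-, h2, -⟩ := hst; simp [← h2])
      exact ih s' c' i' (Or.inl hc')

-- per-word equality
theorem pv_word_eq (w : List Char) (hw : w ≠ []) (hP : ∀ c ∈ w, pvIsVA c = pvIsV c) :
    pvWordA w = pvWordB w := by
  rcases hst : w.foldl pvStepA ([], [], false) with ⟨S, C, I⟩
  have hC : C ≠ [] := by
    have := pv_cur_ne w [] [] false (Or.inr hw)
    rwa [hst] at this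
  have hlin : S ++ [C] = pvPieces w := by
    have hm := pv_machine w [] [] false (by simp) hP
    rw [hst] at hm
    simp [pvLin, hC] at hm
    rw [hm]
    obtain ⟨c, t, rfl⟩ := List.exists_cons_of_ne_nil hw
    by_cases hv : pvIsV c
    · rw [pvM, if_neg (by simp), pvPieces_vowel c t hv]
      simp
    · have hvf : pvIsV c = false := by simpa using hv
      rw [pvM, if_neg (by simp), pvPieces_nonvowel c t hvf]
      cases hps : pvPieces t <;> simp
  unfold pvWordA pvWordB
  rw [hst, ← hlin]
  cases S with
  | nil =>
      simp [hC]
  | cons q qs =>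
      have hlen : (q :: qs ++ [C]).length > 1 := by simp
      simp only [hlen, if_true, List.dropLast_concat, List.getLastD_concat]
      have hne : (q :: qs).dropLast ++ [(q :: qs).getLast?.getD [] ++ C] ≠ [] := by simp
      simp [hC, hne]

-- every word produced by split₀ is non-empty and consists of characters of the input
theorem pv_go_words (P : Char → Prop) (s : List Char) :
    ∀ (cur : List Char) (acc : List (List Char)),
    (∀ w ∈ acc, w ≠ [] ∧ ∀ c ∈ w, P c) → (∀ c ∈ cur, P c) → (∀ c ∈ s, P c) →
    ∀ w ∈ PySem.Chars.split₀.go s cur acc, w ≠ [] ∧ ∀ c ∈ w, P c := by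
  induction s with
  | nil =>
      intro cur acc hacc hcur _
      rw [PySem.Chars.split₀.go]
      by_cases hc : cur.isEmpty
      · simp only [hc, if_true]
        intro w hw
        exact hacc w (by simpa using hw)
      · simp only [hc, Bool.false_eq_true, if_false]
        intro w hw
        rw [List.mem_reverse, List.mem_cons] at hw
        rcases hw with rfl | hw
        · refine ⟨by simpa [List.isEmpty_iff] using hc, ?_⟩
          intro c hcm
          exact hcur c (List.mem_reverse.mp hcm)
        · exact hacc w hw
  | cons c t ih =>
      intro cur acc hacc hcur hs
      rw [PySem.Chars.split₀.go]
      by_cases hsp : PySem.Chars.isspace c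
      · simp only [hsp, if_true]
        by_cases hc : cur.isEmpty
        · simp only [hc, if_true]
          exact ih [] acc hacc (by simp) (fun c' h => hs c' (by simp [h]))
        · simp only [hc, Bool.false_eq_true, if_false]
          refine ih [] (cur.reverse :: acc) ?_ (by simp) (fun c' h => hs c' (by simp [h]))
          intro w hw
          rw [List.mem_cons] at hw
          rcases hw with rfl | hw
          · refine ⟨by simpa [List.isEmpty_iff] using hc, ?_⟩
            intro c' hcm
            exact hcur c' (List.mem_reverse.mp hcm)
          · exact hacc w hw
      · simp only [hsp, Bool.false_eq_true, if_false]
        refine ih (c :: cur) acc hacc ?_ (fun c' h => hs c' (by simp [h]))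
        intro c' h
        rw [List.mem_cons] at h
        rcases h with rfl | h
        · exact hs c' (by simp)
        · exact hcur c' h

theorem pv_words (s : List Char) :
    ∀ w ∈ PySem.Chars.split₀ (PySem.Chars.lower s),
      w ≠ [] ∧ ∀ c ∈ w, pvIsVA c = pvIsV c := by
  exact pv_go_words _ _ [] [] (by simp) (by simp)
    (fun c hc => pv_agree_lower c hc)

theorem pv_fold_eq (ws : List (List Char))
    (h : ∀ w ∈ ws, w ≠ [] ∧ ∀ c ∈ w, pvIsVA c = pvIsV c) :
    ∀ acc, ws.foldl (fun a w => a ++ pvWordA w) acc = ws.foldl (fun a w => a ++ pvWordB w) acc := by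
  induction ws with
  | nil => intro acc; rfl
  | cons w t ih =>
      intro acc
      obtain ⟨hw, hP⟩ := h w (by simp)
      simp only [List.foldl_cons]
      rw [pv_word_eq w hw hP]
      exact ih (fun w' hw' => h w' (by simp [hw'])) _

-- ===== VERDICT (by name: the statement is the Claim_ definition above) =====
theorem syllabify_lyrics_py_spec : Claim_equal_syllabify_lyrics_py := by
  intro lyrics _
  unfold Spec_syllabify_lyrics_py syllabify_lyrics_py syllabify_lyrics_py_alt
  congr 1
  exact pv_fold_eq _ (pv_words lyrics.toList) []
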